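-- pv_equiv track=rewrite | github.com/Emad78/features_generation | generateFeatures.py | trend_down
-- ===== SOURCE A (Python) =====
-- def trend_down(column, period):
--   if period >= len(column):
--     return [0]*len(column)
--   trend = [0]*period + [1] * (len(column)-period)
--   for i in range(period, len(column)):
--     if max(column[i-period:i+1]) > column[i-period]:
--         trend[i] = 0
--   return trend
-- ===== SOURCE B (Python) =====
-- def trend_down(column, period):
--     n = len(column)
--     if period >= n:
--         return [0] * n
--     w = period + 1  # window size; block decomposition of sliding-window maximum
--     pref = [0] * n  # pref[i] = max of column from the start of i's block through i
--     for i in range(n):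
--         pref[i] = column[i] if i % w == 0 else max(pref[i - 1], column[i])
--     suf = [0] * n   # suf[s] = max of column from s through the end of s's block
--     for s in range(n - 1, -1, -1):
--         suf[s] = column[s] if (s % w == w - 1 or s == n - 1) else max(column[s], suf[s + 1])
--     res = [0] * n
--     for i in range(period, n):
--         s = i - period
--         res[i] = 0 if max(suf[s], pref[i]) > column[s] else 1
--     return res
-- ===== Notes on version B (the rewrite author's own statement) =====
-- stated objective: faster
-- what changed: Replaces the per-position max() over a fresh slice (O(n*period)) by the block-decomposition sliding-window maximum: one prefix-max pass and one suffix-max pass over blocks of size period+1, then each window maximum is max(suf[start], pref[end]) in O(1).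
import Mathlib
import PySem

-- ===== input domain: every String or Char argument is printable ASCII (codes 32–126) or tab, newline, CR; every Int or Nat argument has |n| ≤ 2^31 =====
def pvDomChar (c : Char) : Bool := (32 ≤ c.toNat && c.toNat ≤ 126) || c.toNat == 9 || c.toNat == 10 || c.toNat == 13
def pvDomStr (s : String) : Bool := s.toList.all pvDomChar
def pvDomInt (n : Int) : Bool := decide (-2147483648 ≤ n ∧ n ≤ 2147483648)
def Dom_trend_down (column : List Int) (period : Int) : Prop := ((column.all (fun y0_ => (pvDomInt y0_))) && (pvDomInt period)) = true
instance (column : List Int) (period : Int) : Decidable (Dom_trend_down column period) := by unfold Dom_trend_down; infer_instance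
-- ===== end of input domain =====

-- B replaces A's per-position max() over a fresh slice by the block-decomposition
-- sliding-window maximum (prefix-max and suffix-max passes over blocks of size period+1).

-- ===== PORT A =====
def trend_down (column : List Int) (period : Int) : List Int :=
  if period ≥ (column.length : Int) then
    List.replicate column.length 0
  else
    (PySem.List.pyRange period (column.length : Int) 1).foldl (fun trend i =>
        match PySem.List.max? (PySem.List.slice column (some (i - period)) (some (i + 1))) (fun y => y) with
        | some m =>
            if m > PySem.List.pyGetD column (i - period) 0 then PySem.List.pySetD trend i 0 else trend
        | none => trend  -- Python raises ValueError (max of empty slice); reachable only for period < 0, excluded by Pre_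
      )
      (List.replicate period.toNat 0 ++ List.replicate ((column.length : Int) - period).toNat 1)

-- ===== PORT B =====
def trend_down_alt (column : List Int) (period : Int) : List Int :=
  let n : Int := column.length
  if period ≥ n then
    List.replicate column.length 0
  else
    let w : Int := period + 1
    let pref := (PySem.List.pyRange 0 n 1).foldl (fun pref i =>
        PySem.List.pySetD pref i
          (if PySem.Int.mod i w = 0 then PySem.List.pyGetD column i 0
           else max (PySem.List.pyGetD pref (i - 1) 0) (PySem.List.pyGetD column i 0)))
      (List.replicate column.length 0)
    let suf := (PySem.List.pyRange (n - 1) (-1) (-1)).foldl (fun suf s =>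
        PySem.List.pySetD suf s
          (if PySem.Int.mod s w = w - 1 ∨ s = n - 1 then PySem.List.pyGetD column s 0
           else max (PySem.List.pyGetD column s 0) (PySem.List.pyGetD suf (s + 1) 0)))
      (List.replicate column.length 0)
    (PySem.List.pyRange period n 1).foldl (fun res i =>
        PySem.List.pySetD res i
          (if max (PySem.List.pyGetD suf (i - period) 0) (PySem.List.pyGetD pref i 0) >
              PySem.List.pyGetD column (i - period) 0 then (0 : Int) else 1))
      (List.replicate column.length 0)

-- ===== PRECONDITION & SPEC =====
-- Pre_ excludes period < 0, on which Python A raises ValueError (max of an empty slice).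
def Pre_trend_down (column : List Int) (period : Int) : Prop := 0 ≤ period
instance (column : List Int) (period : Int) : Decidable (Pre_trend_down column period) := by
  unfold Pre_trend_down; infer_instance

def pvWitness_trend_down : List Int × Int := ([2, 1, 3, 0], 1)

def Spec_trend_down (column : List Int) (period : Int) (out : List Int) : Prop := out = trend_down_alt column period
instance (column : List Int) (period : Int) (out : List Int) : Decidable (Spec_trend_down column period out) := by unfold Spec_trend_down; infer_instance

-- ===== CLAIM (what is proved, stated in full; the proofs are below) =====
def Claim_equal_trend_down : Prop := ∀ (column : List Int) (period : Int), Dom_trend_down column period → Pre_trend_down column period → Spec_trend_down column period (trend_down column period)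

-- ===== LEMMAS AND PROOFS =====

-- `l.set` seen through `getD`
theorem pv_getD_set (l : List Int) (m j : Nat) (v d : Int) (hm : m < l.length) :
    (l.set m v).getD j d = if j = m then v else l.getD j d := by
  by_cases h : j = m
  · subst h; simp [List.getD_eq_getElem?_getD, hm]
  · simp [List.getD_eq_getElem?_getD, List.getElem?_set_ne (by omega : m ≠ j), h]

theorem pv_foldl_max_init (f : Nat → Int) (l : List Nat) (a b : Int) :
    l.foldl (fun x k => max x (f k)) (max a b) = max a (l.foldl (fun x k => max x (f k)) b) := by
  induction l generalizing b with
  | nil => simp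
  | cons k t ih => simp only [List.foldl_cons]; rw [max_assoc, ih]

-- max of column[s..e] (for s ≤ e), as the running-max loop value
def pvWmax (c : List Int) (s e : Nat) : Int :=
  (List.range' (s + 1) (e - s)).foldl (fun a k => max a (c.getD k 0)) (c.getD s 0)

theorem pvWmax_single (c : List Int) (s : Nat) : pvWmax c s s = c.getD s 0 := by
  simp [pvWmax]

theorem pvWmax_split (c : List Int) (s m e : Nat) (h1 : s ≤ m) (h2 : m < e) :
    pvWmax c s e = max (pvWmax c s m) (pvWmax c (m + 1) e) := by
  unfold pvWmax
  have hsum : e - s = (m - s) + (e - m) := by omega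
  have happ : List.range' (s+1) (m-s) 1 ++ List.range' (s+1+1*(m-s)) (e-m) 1
      = List.range' (s+1) ((m-s)+(e-m)) 1 := List.range'_append ..
  have h3 : s + 1 + 1*(m - s) = m + 1 := by omega
  rw [h3] at happ
  rw [hsum, ← happ, List.foldl_append]
  have h4 : e - m = (e - m - 1) + 1 := by omega
  rw [h4, List.range'_succ, List.foldl_cons]
  rw [pv_foldl_max_init (fun k => c.getD k 0) _ _ (c.getD (m+1) 0)]
  congr 1

theorem pv_mod_sub_one (m w : Nat) (hw : 0 < w) (h : m % w ≠ 0) : (m - 1) % w = m % w - 1 := by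
  have h1 : m % w < w := Nat.mod_lt _ hw
  have h2 : w * (m / w) + m % w = m := Nat.div_add_mod m w
  have h3 : m - 1 = w * (m / w) + (m % w - 1) := by omega
  rw [h3, Nat.mul_add_mod]
  exact Nat.mod_eq_of_lt (by omega)

theorem pv_mod_add_one (m w : Nat) (h : m % w + 1 < w) : (m + 1) % w = m % w + 1 := by
  have h2 : w * (m / w) + m % w = m := Nat.div_add_mod m w
  have h3 : m + 1 = w * (m / w) + (m % w + 1) := by omega
  rw [h3, Nat.mul_add_mod]
  exact Nat.mod_eq_of_lt (by omega)

-- "for i in range(a, a+k): if P i: xs[i] = g i", elementwise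
theorem pv_setloop_aux (P : Int → Prop) [DecidablePred P] (g : Int → Int) (t : List Int) (a : Int)
    (h0 : 0 ≤ a) : ∀ (k : Nat), a + (k : Int) ≤ (t.length : Int) →
    ((PySem.List.pyRange a (a + (k : Int)) 1).foldl
        (fun t i => if P i then PySem.List.pySetD t i (g i) else t) t).length = t.length ∧
      ∀ j : Nat,
        ((PySem.List.pyRange a (a + (k : Int)) 1).foldl
            (fun t i => if P i then PySem.List.pySetD t i (g i) else t) t).getD j 0 =
          if a ≤ (j : Int) ∧ (j : Int) < a + (k : Int) ∧ P (j : Int) then g (j : Int) else t.getD j 0 := by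
  intro k
  induction k with
  | zero =>
    intro _
    rw [PySem.List.pyRange_one_eq_nil (by omega)]
    refine ⟨rfl, fun j => ?_⟩
    rw [if_neg]; · rfl
    rintro ⟨hj1, hj2, _⟩; omega
  | succ k ih =>
    intro hlen
    have hcast : a + ((k + 1 : Nat) : Int) = (a + (k : Int)) + 1 := by push_cast; ring
    rw [hcast, PySem.List.pyRange_one_succ_right (by omega), List.foldl_append, List.foldl_cons,
      List.foldl_nil]
    obtain ⟨ihlen, ihget⟩ := ih (by omega)
    by_cases hP : P (a + (k : Int))
    · rw [if_pos hP, PySem.List.pySetD_of_nonneg _ _ (by omega)]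
      constructor
      · rw [List.length_set, ihlen]
      · intro j
        rw [pv_getD_set _ _ _ _ _ (by rw [ihlen]; omega), ihget]
        by_cases hj : j = (a + (k : Int)).toNat
        · have hje : (j : Int) = a + (k : Int) := by omega
          rw [if_pos hj, if_pos ⟨by omega, by omega, by rw [hje]; exact hP⟩, hje]
        · rw [if_neg hj]
          by_cases hc : a ≤ (j : Int) ∧ (j : Int) < a + (k : Int) ∧ P (j : Int)
          · rw [if_pos hc, if_pos ⟨hc.1, by omega, hc.2.2⟩]
          · rw [if_neg hc, if_neg]
            rintro ⟨h1, h2, h3⟩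
            exact hc ⟨h1, by omega, h3⟩
    · rw [if_neg hP]
      refine ⟨ihlen, fun j => ?_⟩
      rw [ihget]
      by_cases hc : a ≤ (j : Int) ∧ (j : Int) < a + (k : Int) ∧ P (j : Int)
      · rw [if_pos hc, if_pos ⟨hc.1, by omega, hc.2.2⟩]
      · rw [if_neg hc, if_neg]
        rintro ⟨h1, h2, h3⟩
        have hne : (j : Int) ≠ a + (k : Int) := fun he => hP (he ▸ h3)
        exact hc ⟨h1, by omega, h3⟩

-- unconditional variant: "for i in range(a, a+k): xs[i] = g i"
theorem pv_setloop_uncond (g : Int → Int) (t : List Int) (a : Int) (h0 : 0 ≤ a) (k : Nat)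
    (hk : a + (k : Int) ≤ (t.length : Int)) :
    ((PySem.List.pyRange a (a + (k : Int)) 1).foldl
        (fun t i => PySem.List.pySetD t i (g i)) t).length = t.length ∧
      ∀ j : Nat,
        ((PySem.List.pyRange a (a + (k : Int)) 1).foldl
            (fun t i => PySem.List.pySetD t i (g i)) t).getD j 0 =
          if a ≤ (j : Int) ∧ (j : Int) < a + (k : Int) then g (j : Int) else t.getD j 0 := by
  have hbody : (fun (t : List Int) (i : Int) =>
      if (fun (_ : Int) => True) i then PySem.List.pySetD t i (g i) else t)
      = fun (t : List Int) (i : Int) => PySem.List.pySetD t i (g i) := by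
    funext t i; simp
  obtain ⟨hlen, hget⟩ := pv_setloop_aux (fun _ => True) g t a h0 k hk
  rw [hbody] at hlen hget
  refine ⟨hlen, fun j => ?_⟩
  rw [hget]
  by_cases hc : a ≤ (j : Int) ∧ (j : Int) < a + (k : Int)
  · rw [if_pos ⟨hc.1, hc.2, trivial⟩, if_pos hc]
  · rw [if_neg (by tauto), if_neg hc]

theorem pv_drop_take_map (c : List Int) (s len : Nat) (h : s + len ≤ c.length) :
    (c.drop s).take len = (List.range' s len).map (fun k => c.getD k 0) := by
  apply List.ext_getElem
  · simp; omega
  · intro i h1 h2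
    have hs : s + i < c.length := by simp at h1; omega
    simp [List.getElem_take, List.getElem_drop, List.getElem_range', List.getD_eq_getElem?_getD,
      List.getElem?_eq_getElem hs]

theorem pv_max_drop_take (c : List Int) (s len : Nat) (h : s + len ≤ c.length) (hlen : 0 < len) :
    PySem.List.max? ((c.drop s).take len) (fun y => y) = some (pvWmax c s (s + len - 1)) := by
  rw [pv_drop_take_map c s len h]
  obtain ⟨len', rfl⟩ : ∃ l, len = l + 1 := ⟨len - 1, by omega⟩
  rw [List.range'_succ, List.map_cons, PySem.List.max?_id_cons, List.foldl_map]
  simp only [pvWmax]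
  have he : s + (len' + 1) - 1 - s = len' := by omega
  rw [he]

theorem pv_pyRange_neg_append (a b : Int) (h : b < a) :
    PySem.List.pyRange a b (-1) = PySem.List.pyRange a (b + 1) (-1) ++ [b + 1] := by
  rw [PySem.List.pyRange_neg_one_eq_reverse a b, PySem.List.pyRange_neg_one_eq_reverse a (b + 1),
    PySem.List.pyRange_one_cons (show b + 1 < a + 1 by omega), List.reverse_cons]

-- the prefix-max pass: pref[j] = max(column[blockstart(j) .. j])
theorem pv_pref_loop (c : List Int) (w : Nat) (hw : 0 < w) : ∀ (m : Nat), m ≤ c.length →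
    ((PySem.List.pyRange 0 (m : Int) 1).foldl (fun pref i =>
        PySem.List.pySetD pref i
          (if PySem.Int.mod i (w : Int) = 0 then PySem.List.pyGetD c i 0
           else max (PySem.List.pyGetD pref (i - 1) 0) (PySem.List.pyGetD c i 0)))
      (List.replicate c.length 0)).length = c.length ∧
    ∀ j : Nat,
      ((PySem.List.pyRange 0 (m : Int) 1).foldl (fun pref i =>
        PySem.List.pySetD pref i
          (if PySem.Int.mod i (w : Int) = 0 then PySem.List.pyGetD c i 0
           else max (PySem.List.pyGetD pref (i - 1) 0) (PySem.List.pyGetD c i 0)))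
      (List.replicate c.length 0)).getD j 0 =
        if j < m then pvWmax c (j - j % w) j else 0 := by
  intro m
  induction m with
  | zero =>
    intro _
    rw [show ((0 : Nat) : Int) = 0 from rfl, PySem.List.pyRange_one_eq_nil (by omega)]
    refine ⟨by simp, fun j => ?_⟩
    simp
  | succ m ih =>
    intro hm
    obtain ⟨ihlen, ihget⟩ := ih (by omega)
    rw [show ((m + 1 : Nat) : Int) = (m : Int) + 1 by push_cast; ring,
      PySem.List.pyRange_one_succ_right (by omega), List.foldl_append, List.foldl_cons,
      List.foldl_nil]
    have hmodc : PySem.Int.mod (m : Int) (w : Int) = ((m % w : Nat) : Int) := PySem.Int.mod_natCast m w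
    rw [PySem.List.pySetD_natCast]
    constructor
    · rw [List.length_set, ihlen]
    · intro j
      rw [pv_getD_set _ _ _ _ _ (by rw [ihlen]; omega)]
      by_cases hj : j = m
      · subst hj
        rw [if_pos rfl, if_pos (show j < j + 1 by omega), hmodc]
        simp only [Nat.cast_eq_zero]
        by_cases h0 : j % w = 0
        · rw [if_pos h0, PySem.List.pyGetD_natCast, h0, Nat.sub_zero, pvWmax_single]
        · rw [if_neg h0]
          have hj1 : 1 ≤ j := by
            rcases Nat.eq_zero_or_pos j with h | h
            · exact absurd (by rw [h, Nat.zero_mod]) h0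
            · omega
          rw [show ((j : Int) - 1) = ((j - 1 : Nat) : Int) by omega, PySem.List.pyGetD_natCast,
            PySem.List.pyGetD_natCast, ihget]
          rw [if_pos (show j - 1 < j by omega)]
          have hmw : (j - 1) % w = j % w - 1 := pv_mod_sub_one j w hw h0
          have hstart : (j - 1) - (j % w - 1) = j - j % w := by
            have := Nat.mod_lt j (y := w) hw
            omega
          rw [hmw, hstart]
          have hsplit := pvWmax_split c (j - j % w) (j - 1) j
            (by have := Nat.mod_le j w; omega) (by omega)
          rw [show j - 1 + 1 = j by omega] at hsplit
          rw [hsplit, pvWmax_single]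
      · rw [if_neg hj, ihget]
        by_cases hc : j < m
        · rw [if_pos hc, if_pos (show j < m + 1 by omega)]
        · rw [if_neg hc, if_neg (show ¬ j < m + 1 by omega)]

-- the suffix-max pass: suf[j] = max(column[j .. min(blockend(j), n-1)])
theorem pv_suf_loop (c : List Int) (w : Nat) (hw : 0 < w) : ∀ (t : Nat), t ≤ c.length →
    ((PySem.List.pyRange ((c.length : Int) - 1) ((c.length : Int) - 1 - (t : Int)) (-1)).foldl
        (fun suf s =>
          PySem.List.pySetD suf s
            (if PySem.Int.mod s (w : Int) = (w : Int) - 1 ∨ s = (c.length : Int) - 1 then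
               PySem.List.pyGetD c s 0
             else max (PySem.List.pyGetD c s 0) (PySem.List.pyGetD suf (s + 1) 0)))
        (List.replicate c.length 0)).length = c.length ∧
      ∀ j : Nat,
        ((PySem.List.pyRange ((c.length : Int) - 1) ((c.length : Int) - 1 - (t : Int)) (-1)).foldl
            (fun suf s =>
              PySem.List.pySetD suf s
                (if PySem.Int.mod s (w : Int) = (w : Int) - 1 ∨ s = (c.length : Int) - 1 then
                   PySem.List.pyGetD c s 0
                 else max (PySem.List.pyGetD c s 0) (PySem.List.pyGetD suf (s + 1) 0)))
            (List.replicate c.length 0)).getD j 0 =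
          if c.length - t ≤ j ∧ j < c.length then
            pvWmax c j (min (j + (w - 1 - j % w)) (c.length - 1))
          else 0 := by
  intro t
  induction t with
  | zero =>
    intro _
    rw [show ((c.length : Int) - 1 - ((0 : Nat) : Int)) = (c.length : Int) - 1 by push_cast; ring,
      PySem.List.pyRange_neg_one_eq_nil (le_refl _)]
    refine ⟨by simp, fun j => ?_⟩
    rw [List.foldl_nil, if_neg (by omega)]
    simp
  | succ t ih =>
    intro ht
    obtain ⟨ihlen, ihget⟩ := ih (by omega)
    rw [show ((c.length : Int) - 1 - ((t + 1 : Nat) : Int)) = ((c.length : Int) - 1 - (t : Int)) - 1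
        by push_cast; ring,
      pv_pyRange_neg_append _ _ (by omega),
      show ((c.length : Int) - 1 - (t : Int) - 1) + 1 = (c.length : Int) - 1 - (t : Int) by ring,
      List.foldl_append, List.foldl_cons, List.foldl_nil]
    have hs : ((c.length : Int) - 1 - (t : Int)) = ((c.length - 1 - t : Nat) : Int) := by
      push_cast; omega
    rw [hs] at ihget ihlen ⊢
    set sN := c.length - 1 - t with hsN
    have hsNlt : sN < c.length := by omega
    rw [PySem.List.pySetD_natCast, PySem.Int.mod_natCast]
    constructor
    · rw [List.length_set, ihlen]
    · intro j
      rw [pv_getD_set _ _ _ _ _ (by rw [ihlen]; omega)]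
      by_cases hj : j = sN
      · subst hj
        rw [if_pos rfl, if_pos (show c.length - (t + 1) ≤ sN ∧ sN < c.length by omega)]
        have hmlt : sN % w < w := Nat.mod_lt _ hw
        by_cases hc : sN % w = w - 1 ∨ sN = c.length - 1
        · rw [if_pos (by omega), PySem.List.pyGetD_natCast,
            show min (sN + (w - 1 - sN % w)) (c.length - 1) = sN by omega, pvWmax_single]
        · rw [if_neg (by omega), PySem.List.pyGetD_natCast,
            show ((sN : Nat) : Int) + 1 = ((sN + 1 : Nat) : Int) by push_cast; ring,
            PySem.List.pyGetD_natCast, ihget,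
            if_pos (show c.length - t ≤ sN + 1 ∧ sN + 1 < c.length by omega),
            pv_mod_add_one sN w (by omega),
            show min ((sN + 1) + (w - 1 - (sN % w + 1))) (c.length - 1)
              = min (sN + (w - 1 - sN % w)) (c.length - 1) by omega,
            pvWmax_split c sN sN (min (sN + (w - 1 - sN % w)) (c.length - 1)) (le_refl _)
              (by omega),
            pvWmax_single]
      · rw [if_neg hj, ihget]
        by_cases hc : c.length - t ≤ j ∧ j < c.length
        · rw [if_pos hc, if_pos (show c.length - (t + 1) ≤ j ∧ j < c.length by omega)]
        · rw [if_neg hc, if_neg (by omega)]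

-- the two block maxima cover the window [j-p, j] exactly
theorem pv_cover (c : List Int) (p j : Nat) (hpj : p ≤ j) (hj : j < c.length) :
    max (pvWmax c (j - p) (min ((j - p) + (p + 1 - 1 - (j - p) % (p + 1))) (c.length - 1)))
        (pvWmax c (j - j % (p + 1)) j) = pvWmax c (j - p) j := by
  set w := p + 1 with hwdef
  set s := j - p with hsdef
  have hr : s % w < w := Nat.mod_lt _ (by omega)
  have hjs : j = s + (w - 1) := by omega
  by_cases h0 : s % w = 0
  · have hjm : j % w = w - 1 := by
      rw [hjs, Nat.add_mod, h0, Nat.mod_eq_of_lt (show w - 1 < w by omega), Nat.zero_add,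
        Nat.mod_eq_of_lt (show w - 1 < w by omega)]
    rw [hjm, h0, show min (s + (w - 1 - 0)) (c.length - 1) = j by omega,
      show j - (w - 1) = s by omega, max_self]
  · have h1 : 1 ≤ s % w := Nat.pos_of_ne_zero h0
    have hjm : j % w = s % w - 1 := by
      rw [hjs, Nat.add_mod, Nat.mod_eq_of_lt (show w - 1 < w by omega),
        show s % w + (w - 1) = w + (s % w - 1) by omega, Nat.add_mod_left,
        Nat.mod_eq_of_lt (show s % w - 1 < w by omega)]
    rw [hjm, show min (s + (w - 1 - s % w)) (c.length - 1) = s + (w - 1 - s % w) by omega,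
      show j - (s % w - 1) = (s + (w - 1 - s % w)) + 1 by omega,
      ← pvWmax_split c s (s + (w - 1 - s % w)) j (by omega) (by omega)]

-- A's initial list [0]*p ++ [1]*(n-p), elementwise
theorem pv_t0_getD (p n j : Nat) (hpn : p ≤ n) :
    (List.replicate p (0 : Int) ++ List.replicate (n - p) 1).getD j 0 =
      if j < p then 0 else if j < n then 1 else 0 := by
  by_cases h1 : j < p
  · rw [if_pos h1, List.getD_eq_getElem?_getD, List.getElem?_append_left (by simp; omega),
      List.getElem?_replicate, if_pos h1]
    rfl
  · rw [if_neg h1, List.getD_eq_getElem?_getD,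
      List.getElem?_append_right (by simp; omega)]
    simp only [List.length_replicate, List.getElem?_replicate]
    by_cases h2 : j < n
    · rw [if_pos h2, if_pos (by omega)]; rfl
    · rw [if_neg h2, if_neg (by omega)]; rfl

-- A's loop, elementwise: trend[j] = 0 iff the window max strictly exceeds the window start
theorem pv_A_loop (c : List Int) (p : Nat) (t : List Int) : ∀ (k : Nat),
    (p : Int) + (k : Int) ≤ (c.length : Int) → (p : Int) + (k : Int) ≤ (t.length : Int) →
    ((PySem.List.pyRange (p : Int) ((p : Int) + (k : Int)) 1).foldl (fun trend i =>
        match PySem.List.max? (PySem.List.slice c (some (i - (p : Int))) (some (i + 1))) (fun y => y) with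
        | some m =>
            if m > PySem.List.pyGetD c (i - (p : Int)) 0 then PySem.List.pySetD trend i 0 else trend
        | none => trend) t).length = t.length ∧
      ∀ j : Nat,
        ((PySem.List.pyRange (p : Int) ((p : Int) + (k : Int)) 1).foldl (fun trend i =>
            match PySem.List.max? (PySem.List.slice c (some (i - (p : Int))) (some (i + 1))) (fun y => y) with
            | some m =>
                if m > PySem.List.pyGetD c (i - (p : Int)) 0 then PySem.List.pySetD trend i 0 else trend
            | none => trend) t).getD j 0 =
          if p ≤ j ∧ j < p + k ∧ c.getD (j - p) 0 < pvWmax c (j - p) j then 0 else t.getD j 0 := by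
  intro k
  induction k with
  | zero =>
    intro _ _
    rw [show ((0 : Nat) : Int) = 0 from rfl, add_zero, PySem.List.pyRange_one_eq_nil (le_refl _)]
    refine ⟨rfl, fun j => ?_⟩
    rw [List.foldl_nil, if_neg (by omega)]
  | succ k ih =>
    intro hc ht
    obtain ⟨ihlen, ihget⟩ := ih (by push_cast at *; omega) (by push_cast at *; omega)
    rw [show ((k + 1 : Nat) : Int) = (k : Int) + 1 by push_cast; ring, ← add_assoc,
      PySem.List.pyRange_one_succ_right (by omega), List.foldl_append, List.foldl_cons,
      List.foldl_nil]
    -- evaluate the body at i = p + k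
    have hsub : ((p : Int) + (k : Int)) - (p : Int) = ((k : Nat) : Int) := by ring
    have hplus : ((p : Int) + (k : Int)) + 1 = ((k + p + 1 : Nat) : Int) := by push_cast; ring
    rw [hsub, hplus, PySem.List.slice_natCast, show k + p + 1 - k = p + 1 by omega,
      pv_max_drop_take c k (p + 1) (by push_cast at hc; omega) (by omega),
      show k + (p + 1) - 1 = k + p by omega, PySem.List.pyGetD_natCast]
    simp only [gt_iff_lt]
    by_cases hcond : c.getD k 0 < pvWmax c k (k + p)
    · rw [if_pos hcond, PySem.List.pySetD_of_nonneg _ _ (by omega)]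
      constructor
      · rw [List.length_set, ihlen]
      · intro j
        rw [pv_getD_set _ _ _ _ _ (by rw [ihlen]; omega), ihget]
        by_cases hj : j = ((p : Int) + (k : Int)).toNat
        · have hje : j = p + k := by omega
          rw [if_pos hj, if_pos ⟨by omega, by omega,
            by rw [hje, show p + k - p = k by omega, show p + k = k + p by omega]; exact hcond⟩]
        · rw [if_neg hj]
          by_cases hc2 : p ≤ j ∧ j < p + k ∧ c.getD (j - p) 0 < pvWmax c (j - p) j
          · rw [if_pos hc2, if_pos ⟨hc2.1, by omega, hc2.2.2⟩]
          · rw [if_neg hc2, if_neg]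
            rintro ⟨h1, h2, h3⟩
            exact hc2 ⟨h1, by omega, h3⟩
    · rw [if_neg hcond]
      refine ⟨ihlen, fun j => ?_⟩
      rw [ihget]
      by_cases hc2 : p ≤ j ∧ j < p + k ∧ c.getD (j - p) 0 < pvWmax c (j - p) j
      · rw [if_pos hc2, if_pos ⟨hc2.1, by omega, hc2.2.2⟩]
      · rw [if_neg hc2, if_neg]
        rintro ⟨h1, h2, h3⟩
        have hje : j = p + k := by
          by_contra hne
          exact hc2 ⟨h1, by omega, h3⟩
        rw [hje, show p + k - p = k by omega, show p + k = k + p by omega] at h3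
        exact hcond h3

theorem pv_list_eq_of_getD (A B : List Int) (hA : A.length = B.length)
    (h : ∀ j, j < A.length → A.getD j 0 = B.getD j 0) : A = B := by
  apply List.ext_getElem hA
  intro i h1 h2
  rw [← List.getD_eq_getElem A 0 h1, ← List.getD_eq_getElem B 0 h2]
  exact h i h1

-- ===== VERDICT (by name: the statement is the Claim_ definition above) =====
theorem trend_down_spec : Claim_equal_trend_down := by
  intro column period _ hpre
  unfold Spec_trend_down
  unfold Pre_trend_down at hpre
  by_cases hbig : period ≥ (column.length : Int)
  · simp only [trend_down, trend_down_alt, if_pos hbig]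
  · simp only [trend_down, trend_down_alt]
    rw [if_neg hbig, if_neg hbig]
    have hper : period = ((period.toNat : Nat) : Int) := by omega
    have hpn : period.toNat < column.length := by omega
    rw [hper,
      show ((period.toNat : Int) + 1) = ((period.toNat + 1 : Nat) : Int) by push_cast; ring,
      show ((period.toNat : Int)).toNat = period.toNat from Int.toNat_natCast _,
      show ((column.length : Int) - (period.toNat : Int)).toNat = column.length - period.toNat
        by omega]
    -- A's loop, characterized
    obtain ⟨halen, haget⟩ := pv_A_loop column period.toNat
      (List.replicate period.toNat 0 ++ List.replicate (column.length - period.toNat) (1 : Int))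
      (column.length - period.toNat) (by push_cast; omega)
      (by simp only [List.length_append, List.length_replicate]; push_cast; omega)
    rw [show ((period.toNat : Int) + ((column.length - period.toNat : Nat) : Int))
        = ((column.length : Nat) : Int) by push_cast; omega] at halen haget
    -- B's prefix and suffix passes, characterized
    obtain ⟨hplen, hpget⟩ := pv_pref_loop column (period.toNat + 1) (by omega)
      column.length (le_refl _)
    obtain ⟨hslen, hsget⟩ := pv_suf_loop column (period.toNat + 1) (by omega)
      column.length (le_refl _)
    rw [show ((column.length : Int) - 1 - ((column.length : Nat) : Int)) = -1 by ring]
      at hslen hsget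
    -- B's result pass, characterized
    obtain ⟨hrlen, hrget⟩ := pv_setloop_uncond
      (fun i =>
        if max
            (PySem.List.pyGetD
              ((PySem.List.pyRange ((column.length : Int) - 1) (-1) (-1)).foldl
                (fun suf s =>
                  PySem.List.pySetD suf s
                    (if PySem.Int.mod s ((period.toNat + 1 : Nat) : Int)
                          = ((period.toNat + 1 : Nat) : Int) - 1 ∨ s = (column.length : Int) - 1
                     then PySem.List.pyGetD column s 0
                     else max (PySem.List.pyGetD column s 0) (PySem.List.pyGetD suf (s + 1) 0)))
                (List.replicate column.length 0))
              (i - (period.toNat : Int)) 0)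
            (PySem.List.pyGetD
              ((PySem.List.pyRange 0 ((column.length : Nat) : Int) 1).foldl
                (fun pref i =>
                  PySem.List.pySetD pref i
                    (if PySem.Int.mod i ((period.toNat + 1 : Nat) : Int) = 0
                     then PySem.List.pyGetD column i 0
                     else max (PySem.List.pyGetD pref (i - 1) 0) (PySem.List.pyGetD column i 0)))
                (List.replicate column.length 0))
              i 0) >
          PySem.List.pyGetD column (i - (period.toNat : Int)) 0 then (0 : Int) else 1)
      (List.replicate column.length 0) (period.toNat : Int) (by omega)
      (column.length - period.toNat)
      (by simp only [List.length_replicate]; push_cast; omega)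
    rw [show ((period.toNat : Int) + ((column.length - period.toNat : Nat) : Int))
        = ((column.length : Nat) : Int) by push_cast; omega] at hrlen hrget
    apply pv_list_eq_of_getD
    · rw [halen, hrlen]
      simp only [List.length_append, List.length_replicate]
      omega
    · intro j hj
      rw [halen] at hj
      simp only [List.length_append, List.length_replicate] at hj
      have hjn : j < column.length := by omega
      rw [haget, hrget]
      by_cases hjp : period.toNat ≤ j
      · rw [if_pos (show (period.toNat : Int) ≤ (j : Int) ∧ (j : Int) < ((column.length : Nat) : Int)
            by constructor <;> omega)]
        rw [show ((j : Int) - (period.toNat : Int)) = ((j - period.toNat : Nat) : Int) by omega,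
          PySem.List.pyGetD_natCast, PySem.List.pyGetD_natCast, PySem.List.pyGetD_natCast,
          hsget, hpget,
          if_pos (show column.length - column.length ≤ j - period.toNat
              ∧ j - period.toNat < column.length by omega),
          if_pos hjn, pv_cover column period.toNat j hjp hjn]
        by_cases hcmp : column.getD (j - period.toNat) 0 < pvWmax column (j - period.toNat) j
        · rw [if_pos ⟨hjp, by omega, hcmp⟩, if_pos hcmp]
        · rw [if_neg (by rintro ⟨_, _, h3⟩; exact hcmp h3), if_neg (fun hcc => hcmp hcc),
            pv_t0_getD period.toNat column.length j (by omega), if_neg (by omega), if_pos hjn]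
      · rw [if_neg (by rintro ⟨h1, _, _⟩; omega),
          if_neg (by rintro ⟨h1, _⟩; omega),
          pv_t0_getD period.toNat column.length j (by omega), if_pos (by omega),
          List.getD_replicate 0 (show j < column.length by omega)]
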